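-- pv_equiv track=rewrite | github.com/DE-QATAG/DE-QATAG | seq2seq/eval_util.py | evaluate
-- ===== SOURCE A (Python) =====
-- def evaluate(label_input, label_pred, seqs, segments, masks=None):
--     assert len(label_input) == len(label_pred)
--     assert len(label_input) == len(seqs)
--     assert len(label_input) == len(segments)
--     r = 0
--     l_t = 0
--     p_t = 0
--     for i in range(len(label_input)):
--         for j in range(len(label_input[i])):
--             if seqs[i][j] == 0:
--                 break
--             if segments[i][j] == 0:
--                 continue
--             if masks is not None and masks[i][j] == 0:
--                 continue
--             if label_pred[i][j] != 0:
--                 p_t += 1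
--             if label_input[i][j] != 0:
--                 l_t += 1
--             if label_input[i][j] == label_pred[i][j] and label_input[i][j] != 0:
--                 r += 1
--     return r, p_t, l_t
-- ===== SOURCE B (Python) =====
-- def evaluate(label_input, label_pred, seqs, segments, masks=None):
--     assert len(label_input) == len(label_pred)
--     assert len(label_input) == len(seqs)
--     assert len(label_input) == len(segments)
--     if masks is None:
--         masks = [[1] * len(row) for row in label_input]
--     pairs = []
--     for grow, prow, srow, segrow, mrow in zip(label_input, label_pred, seqs, segments, masks):
--         for g, p, s, seg, m in zip(grow, prow, srow, segrow, mrow):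
--             if s == 0:
--                 break
--             if seg != 0 and m != 0:
--                 pairs.append((g, p))
--     r = sum(1 for g, p in pairs if g == p and g != 0)
--     p_t = sum(1 for _, p in pairs if p != 0)
--     l_t = sum(1 for g, _ in pairs if g != 0)
--     return r, p_t, l_t
-- ===== Notes on version B (the rewrite author's own statement) =====
-- stated objective: idiomatic
-- what changed: B replaces A's index-juggling nested loops with a gather-then-count decomposition: zip the five row lists (no indices at all), collect the surviving (gold, pred) pairs into one list, then compute the three counters in three separate comprehension passes instead of A's interleaved in-loop increments.
-- outside the precondition, e.g. on evaluate([[1, 2]], [[3, 4]], [[0, 9]], [[]], None): A returns (0, 0, 0), B returns (0, 0, 0)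
import Mathlib
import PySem

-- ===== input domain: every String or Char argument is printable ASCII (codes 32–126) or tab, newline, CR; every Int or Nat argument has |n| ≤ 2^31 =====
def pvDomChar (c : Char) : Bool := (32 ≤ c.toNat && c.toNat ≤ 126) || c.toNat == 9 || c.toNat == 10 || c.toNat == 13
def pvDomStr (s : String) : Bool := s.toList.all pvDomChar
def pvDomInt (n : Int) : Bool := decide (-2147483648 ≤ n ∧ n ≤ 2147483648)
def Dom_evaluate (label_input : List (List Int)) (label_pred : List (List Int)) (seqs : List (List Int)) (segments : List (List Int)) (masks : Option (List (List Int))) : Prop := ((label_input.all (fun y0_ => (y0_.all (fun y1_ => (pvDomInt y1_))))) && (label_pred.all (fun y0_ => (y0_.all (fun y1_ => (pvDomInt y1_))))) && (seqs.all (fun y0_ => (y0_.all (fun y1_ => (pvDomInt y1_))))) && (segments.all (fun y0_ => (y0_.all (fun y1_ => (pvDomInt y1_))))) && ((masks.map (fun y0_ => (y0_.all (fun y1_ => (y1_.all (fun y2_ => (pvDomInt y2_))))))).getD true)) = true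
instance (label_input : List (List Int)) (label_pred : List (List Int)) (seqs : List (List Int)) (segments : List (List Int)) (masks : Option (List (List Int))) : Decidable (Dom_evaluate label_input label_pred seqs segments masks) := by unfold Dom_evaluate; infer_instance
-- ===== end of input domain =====

-- B gathers the surviving (gold, pred) pairs with index-free zips and then counts the
-- three statistics in three separate passes, instead of A's indexed loops with
-- interleaved counter updates.  Same cost; objective: idiomatic.

-- ===== PORT A =====
-- inner `for j in range(...)` loop of A, with its break/continue structure
def evalRowA (g p s seg : List Int) (m : Option (List Int)) : List Nat → Int × Int × Int → Int × Int × Int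
  | [], acc => acc
  | j :: js, acc =>
    if s.getD j 0 == 0 then acc
    else if seg.getD j 0 == 0 then evalRowA g p s seg m js acc
    else if (match m with | some mm => mm.getD j 0 == 0 | none => false) then
      evalRowA g p s seg m js acc
    else
      let pt := if p.getD j 0 != 0 then acc.2.1 + 1 else acc.2.1
      let lt := if g.getD j 0 != 0 then acc.2.2 + 1 else acc.2.2
      let r := if g.getD j 0 == p.getD j 0 && g.getD j 0 != 0 then acc.1 + 1 else acc.1
      evalRowA g p s seg m js (r, pt, lt)

def evaluate (label_input : List (List Int)) (label_pred : List (List Int)) (seqs : List (List Int)) (segments : List (List Int)) (masks : Option (List (List Int))) : Int × Int × Int :=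
  (List.range label_input.length).foldl (fun acc i =>
    evalRowA (label_input.getD i []) (label_pred.getD i []) (seqs.getD i []) (segments.getD i [])
      (masks.map (fun m => m.getD i []))
      (List.range (label_input.getD i []).length) acc) (0, 0, 0)

-- ===== PORT B =====
-- inner zip loop of B: break on s == 0, keep the pair when seg ≠ 0 and m ≠ 0
def gatherRow : List (Int × Int × Int × Int × Int) → List (Int × Int)
  | [] => []
  | (g, p, s, seg, m) :: rest =>
    if s == 0 then []
    else if seg != 0 && m != 0 then (g, p) :: gatherRow rest
    else gatherRow rest

def evaluate_alt (label_input : List (List Int)) (label_pred : List (List Int)) (seqs : List (List Int)) (segments : List (List Int)) (masks : Option (List (List Int))) : Int × Int × Int :=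
  let ms := match masks with
    | some m => m
    | none => label_input.map (fun row => List.replicate row.length 1)
  let rows := label_input.zip (label_pred.zip (seqs.zip (segments.zip ms)))
  let pairs := rows.flatMap (fun x =>
    gatherRow (x.1.zip (x.2.1.zip (x.2.2.1.zip (x.2.2.2.1.zip x.2.2.2.2)))))
  ((pairs.countP fun gp => gp.1 == gp.2 && gp.1 != 0 : Nat),
   (pairs.countP fun gp => gp.2 != 0 : Nat),
   (pairs.countP fun gp => gp.1 != 0 : Nat))

-- ===== PRECONDITION & SPEC =====
-- Pre_ excludes inputs where A raises: mismatched outer lengths (A's asserts) and ragged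
-- rows, on which A generally hits an IndexError; a few ragged inputs on which an early
-- break/continue lets A return normally are also excluded (only because in-range is the
-- closed-form shape condition) — B returns the same value on those anyway.
def Pre_evaluate (label_input : List (List Int)) (label_pred : List (List Int)) (seqs : List (List Int)) (segments : List (List Int)) (masks : Option (List (List Int))) : Prop :=
  label_input.length = label_pred.length ∧
  label_input.length = seqs.length ∧
  label_input.length = segments.length ∧
  (∀ i < label_input.length,
      (label_input.getD i []).length ≤ (label_pred.getD i []).length ∧
      (label_input.getD i []).length ≤ (seqs.getD i []).length ∧
      (label_input.getD i []).length ≤ (segments.getD i []).length) ∧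
  (∀ m ∈ masks.toList, label_input.length ≤ m.length ∧
       ∀ i < label_input.length, (label_input.getD i []).length ≤ (m.getD i []).length)

instance (label_input : List (List Int)) (label_pred : List (List Int)) (seqs : List (List Int)) (segments : List (List Int)) (masks : Option (List (List Int))) : Decidable (Pre_evaluate label_input label_pred seqs segments masks) := by unfold Pre_evaluate; infer_instance

def pvWitness_evaluate : List (List Int) × List (List Int) × List (List Int) × List (List Int) × Option (List (List Int)) :=
  ([[1, 0], [2]], [[1, 2], [3]], [[1, 1], [1]], [[1, 0], [1]], none)

def Spec_evaluate (label_input : List (List Int)) (label_pred : List (List Int)) (seqs : List (List Int)) (segments : List (List Int)) (masks : Option (List (List Int))) (out : Int × Int × Int) : Prop := out = evaluate_alt label_input label_pred seqs segments masks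
instance (label_input : List (List Int)) (label_pred : List (List Int)) (seqs : List (List Int)) (segments : List (List Int)) (masks : Option (List (List Int))) (out : Int × Int × Int) : Decidable (Spec_evaluate label_input label_pred seqs segments masks out) := by unfold Spec_evaluate; infer_instance

-- ===== CLAIM (what is proved, stated in full; the proofs are below) =====
def Claim_equal_evaluate : Prop := ∀ (label_input : List (List Int)) (label_pred : List (List Int)) (seqs : List (List Int)) (segments : List (List Int)) (masks : Option (List (List Int))), Dom_evaluate label_input label_pred seqs segments masks → Pre_evaluate label_input label_pred seqs segments masks → Spec_evaluate label_input label_pred seqs segments masks (evaluate label_input label_pred seqs segments masks)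

-- ===== LEMMAS AND PROOFS =====

-- the three counting predicates of B
def cR (gp : Int × Int) : Bool := gp.1 == gp.2 && gp.1 != 0
def cP (gp : Int × Int) : Bool := gp.2 != 0
def cL (gp : Int × Int) : Bool := gp.1 != 0

-- the quintuple A reads at position j of a row (mask defaults to 1 when masks is None)
def tup (g p s seg : List Int) (m : Option (List Int)) (j : Nat) : Int × Int × Int × Int × Int :=
  (g.getD j 0, p.getD j 0, s.getD j 0, seg.getD j 0,
   match m with | some mm => mm.getD j 0 | none => 1)

-- keep-case unfolding of gatherRow at a masked position (some-mask rows)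
theorem gatherRow_keep_some (g p s seg mm : List Int) (j : Nat) (rest : List (Int × Int × Int × Int × Int))
    (hs : ¬ s[j]?.getD 0 = 0) (hseg : ¬ seg[j]?.getD 0 = 0) (hm : ¬ mm[j]?.getD 0 = 0) :
    gatherRow (tup g p s seg (some mm) j :: rest) =
      (g[j]?.getD 0, p[j]?.getD 0) :: gatherRow rest := by
  simp [gatherRow, tup, hs, hseg, hm]

-- A's inner loop = B's gathered pairs counted, for any index list
theorem evalRowA_eq_counts (g p s seg : List Int) (m : Option (List Int)) :
    ∀ (js : List Nat) (acc : Int × Int × Int),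
      evalRowA g p s seg m js acc =
        (acc.1 + ((gatherRow (js.map (tup g p s seg m))).countP cR : Nat),
         acc.2.1 + ((gatherRow (js.map (tup g p s seg m))).countP cP : Nat),
         acc.2.2 + ((gatherRow (js.map (tup g p s seg m))).countP cL : Nat)) := by
  intro js
  induction js with
  | nil => intro acc; simp [evalRowA, gatherRow]
  | cons j js ih =>
    intro acc
    by_cases hs : s[j]?.getD 0 = 0
    · simp [evalRowA, gatherRow, tup, hs]
    · by_cases hseg : seg[j]?.getD 0 = 0
      · simp [evalRowA, gatherRow, tup, hs, hseg, ih]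
      · cases m with
        | none =>
          simp only [evalRowA, ih]
          simp [gatherRow, tup, hs, hseg, List.countP_cons, cR, cP, cL, Prod.ext_iff]
          refine ⟨?_, ?_, ?_⟩ <;> (split_ifs <;> simp_all <;> push_cast <;> omega)
        | some mm =>
          by_cases hm : mm[j]?.getD 0 = 0
          · simp [evalRowA, gatherRow, tup, hs, hseg, hm, ih]
          · simp only [evalRowA, ih, List.map_cons]
            rw [gatherRow_keep_some g p s seg mm j _ hs hseg hm]
            simp [hs, hseg, hm, List.countP_cons, cR, cP, cL, Prod.ext_iff]
            refine ⟨?_, ?_, ?_⟩ <;> (split_ifs <;> simp_all <;> push_cast <;> omega)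

-- the pairs contributed by row i (phrased over A's index list; both sides reduce to it)
def rowP (gs ps ss segs : List (List Int)) (masks : Option (List (List Int))) (i : Nat) : List (Int × Int) :=
  gatherRow ((List.range (gs.getD i []).length).map
    (tup (gs.getD i []) (ps.getD i []) (ss.getD i []) (segs.getD i []) (masks.map (fun m => m.getD i []))))

-- a foldl whose step adds per-index counts equals counts over the concatenation
theorem foldl_counts (P : Nat → List (Int × Int))
    (F : (Int × Int × Int) → Nat → (Int × Int × Int))
    (hF : ∀ acc i, F acc i = (acc.1 + ((P i).countP cR : Nat), acc.2.1 + ((P i).countP cP : Nat), acc.2.2 + ((P i).countP cL : Nat))) :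
    ∀ (is : List Nat) (acc : Int × Int × Int),
      is.foldl F acc = (acc.1 + ((is.flatMap P).countP cR : Nat), acc.2.1 + ((is.flatMap P).countP cP : Nat), acc.2.2 + ((is.flatMap P).countP cL : Nat)) := by
  intro is
  induction is with
  | nil => intro acc; simp
  | cons i is ih =>
    intro acc
    simp only [List.foldl_cons, ih, hF, List.flatMap_cons, List.countP_append]
    refine Prod.ext ?_ (Prod.ext ?_ ?_) <;> (simp; push_cast; ring)

-- A's port as counts over the concatenated per-row pair lists
theorem evaluate_eq (gs ps ss segs : List (List Int)) (masks : Option (List (List Int))) :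
    evaluate gs ps ss segs masks =
      (((((List.range gs.length).flatMap (rowP gs ps ss segs masks)).countP cR : Nat) : Int),
       ((((List.range gs.length).flatMap (rowP gs ps ss segs masks)).countP cP : Nat) : Int),
       ((((List.range gs.length).flatMap (rowP gs ps ss segs masks)).countP cL : Nat) : Int)) := by
  unfold evaluate
  rw [foldl_counts (rowP gs ps ss segs masks) _
        (fun acc i => evalRowA_eq_counts _ _ _ _ _ _ _)]
  simp

-- a 5-way zip truncated by its first list is the map of per-index reads over range
theorem zip5_eq_map_range {α β γ δ ε : Type} (a : List α) (b : List β) (c : List γ) (d : List δ) (e : List ε)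
    (da : α) (db : β) (dc : γ) (dd : δ) (de : ε)
    (h1 : a.length ≤ b.length) (h2 : a.length ≤ c.length) (h3 : a.length ≤ d.length) (h4 : a.length ≤ e.length) :
    a.zip (b.zip (c.zip (d.zip e))) =
      (List.range a.length).map (fun i => (a.getD i da, b.getD i db, c.getD i dc, d.getD i dd, e.getD i de)) := by
  apply List.ext_getElem
  · simp; omega
  · intro i hi1 hi2
    have ha : i < a.length := by simp at hi1; omega
    have hb : i < b.length := lt_of_lt_of_le ha h1
    have hc : i < c.length := lt_of_lt_of_le ha h2
    have hd : i < d.length := lt_of_lt_of_le ha h3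
    have he : i < e.length := lt_of_lt_of_le ha h4
    simp [List.getElem_zip, List.getD_eq_getElem?_getD, ha, hb, hc, hd, he]

-- a flatMap over a mapped list
theorem flatMap_map_eq {α β γ : Type} (l : List α) (f : α → β) (g : β → List γ) :
    (l.map f).flatMap g = l.flatMap (fun x => g (f x)) := by
  induction l with
  | nil => rfl
  | cons x xs ih => simp [ih]

-- the mask value A consults at row i, position j (1 when masks is None)
def maskVal (masks : Option (List (List Int))) (i j : Nat) : Int :=
  match masks with | some m => (m.getD i []).getD j 0 | none => 1

-- B's port as the same counts, on inputs satisfying Pre_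
theorem evaluate_alt_eq (gs ps ss segs : List (List Int)) (masks : Option (List (List Int)))
    (hpre : Pre_evaluate gs ps ss segs masks) :
    evaluate_alt gs ps ss segs masks =
      (((((List.range gs.length).flatMap (rowP gs ps ss segs masks)).countP cR : Nat) : Int),
       ((((List.range gs.length).flatMap (rowP gs ps ss segs masks)).countP cP : Nat) : Int),
       ((((List.range gs.length).flatMap (rowP gs ps ss segs masks)).countP cL : Nat) : Int)) := by
  obtain ⟨h1, h2, h3, h4, h5⟩ := hpre
  have key : ∀ (ms : List (List Int)), gs.length ≤ ms.length →
      (∀ i, i < gs.length → (gs.getD i []).length ≤ (ms.getD i []).length ∧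
        ∀ j, j < (gs.getD i []).length →
          (ms.getD i []).getD j 0 = maskVal masks i j) →
      (gs.zip (ps.zip (ss.zip (segs.zip ms)))).flatMap (fun x =>
          gatherRow (x.1.zip (x.2.1.zip (x.2.2.1.zip (x.2.2.2.1.zip x.2.2.2.2))))) =
        (List.range gs.length).flatMap (rowP gs ps ss segs masks) := by
    intro ms hlen hrow
    rw [zip5_eq_map_range gs ps ss segs ms [] [] [] [] [] (le_of_eq h1) (le_of_eq h2) (le_of_eq h3) hlen]
    rw [flatMap_map_eq]
    apply List.flatMap_congr
    intro i hi
    have hi' : i < gs.length := List.mem_range.mp hi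
    obtain ⟨hmlen, hval⟩ := hrow i hi'
    obtain ⟨hpl, hsl, hgl⟩ := h4 i hi'
    show gatherRow ((gs.getD i []).zip ((ps.getD i []).zip ((ss.getD i []).zip
        ((segs.getD i []).zip (ms.getD i []))))) = rowP gs ps ss segs masks i
    rw [zip5_eq_map_range (gs.getD i []) (ps.getD i []) (ss.getD i []) (segs.getD i [])
          (ms.getD i []) 0 0 0 0 0 hpl hsl hgl hmlen]
    unfold rowP
    congr 1
    apply List.map_congr_left
    intro j hj
    have hj' : j < (gs.getD i []).length := List.mem_range.mp hj
    have := hval j hj'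
    cases masks with
    | none => simp [maskVal] at this; simp [tup, this]
    | some m => simp [maskVal] at this; simp [tup, this]
  cases masks with
  | none =>
    have hlen : gs.length ≤ (gs.map fun row => List.replicate row.length (1 : Int)).length := by simp
    have hrow : ∀ i, i < gs.length →
        (gs.getD i []).length ≤ ((gs.map fun row => List.replicate row.length (1 : Int)).getD i []).length ∧
        ∀ j, j < (gs.getD i []).length →
          ((gs.map fun row => List.replicate row.length (1 : Int)).getD i []).getD j 0 =
            maskVal none i j := by
      intro i hi
      have hrepl : (gs.map fun row => List.replicate row.length (1 : Int)).getD i [] =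
          List.replicate (gs.getD i []).length (1 : Int) := by
        simp [List.getD_eq_getElem?_getD, List.getElem?_map, hi]
      constructor
      · rw [hrepl]; simp
      · intro j hj
        rw [hrepl]
        rw [List.getD_eq_getElem?_getD] at hj
        simp [maskVal, List.getD_eq_getElem?_getD, hj]
    have := key (gs.map fun row => List.replicate row.length (1 : Int)) hlen hrow
    simp only [evaluate_alt]
    rw [this]
    rfl
  | some m =>
    obtain ⟨hml, hmr⟩ := h5 m (by simp)
    have hrow : ∀ i, i < gs.length →
        (gs.getD i []).length ≤ (m.getD i []).length ∧
        ∀ j, j < (gs.getD i []).length →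
          ((m.getD i []).getD j 0) = maskVal (some m) i j := by
      intro i hi
      exact ⟨hmr i hi, fun j hj => rfl⟩
    have := key m hml hrow
    simp only [evaluate_alt]
    rw [this]
    rfl

-- ===== VERDICT (by name: the statement is the Claim_ definition above) =====
theorem evaluate_spec : Claim_equal_evaluate := by
  intro gs ps ss segs masks hdom hpre
  unfold Spec_evaluate
  rw [evaluate_eq, evaluate_alt_eq gs ps ss segs masks hpre]
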